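-- pv_equiv track=rewrite | github.com/jakebodea/PlayfairCipher | PlayfairLibrary.py | add_x
-- ===== SOURCE A (Python) =====
-- def add_x(text):  # adds an 'X' between double letters and at the end of a string if it has an odd number of characters
--     idx = 0
--     idx2 = 1
--     enc_text = text
--     temp = ''
--
--     for i in range(len(text) - 1):
--         if text[i] == text[i+1]:
--             temp = enc_text[:idx + idx2] + 'X' + text[idx + 1:]
--             enc_text = temp
--             idx2 += 1
--         idx += 1
--
--     if len(enc_text) % 2 != 0:
--         enc_text = enc_text + 'X'
--
--     return enc_text
-- ===== SOURCE B (Python) =====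
-- def add_x(text):  # adds an 'X' between double letters and at the end of a string if it has an odd number of characters
--     pieces = [c + 'X' if c == n else c for c, n in zip(text, text[1:])]
--     enc_text = ''.join(pieces) + text[-1:]
--     if len(enc_text) % 2 != 0:
--         enc_text = enc_text + 'X'
--     return enc_text
-- ===== Notes on version B (the rewrite author's own statement) =====
-- stated objective: faster
-- what changed: Replaces A's index-splicing loop, which rebuilds the whole string on every double letter, by a single pairwise pass: zip each character with its successor, emit the character plus a pad letter for equal pairs, join, append the final character, then apply the same odd-length pad.
import Mathlib
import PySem

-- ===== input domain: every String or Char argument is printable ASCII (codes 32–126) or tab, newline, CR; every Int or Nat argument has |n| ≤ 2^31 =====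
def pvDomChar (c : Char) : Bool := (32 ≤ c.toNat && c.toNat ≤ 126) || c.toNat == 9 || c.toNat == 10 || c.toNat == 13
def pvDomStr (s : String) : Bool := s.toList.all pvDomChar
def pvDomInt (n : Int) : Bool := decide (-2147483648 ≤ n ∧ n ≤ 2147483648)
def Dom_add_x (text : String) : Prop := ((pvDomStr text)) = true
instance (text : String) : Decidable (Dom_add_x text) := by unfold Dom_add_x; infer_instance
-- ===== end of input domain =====

-- B replaces A's index-splicing loop by one pairwise zip pass: same return value, O(n) instead of O(n^2).

-- ===== PORT A =====
-- one loop iteration of A: state (idx, idx2, enc_text), loop variable i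
def addXStepA (l : List Char) (st : Int × Int × List Char) (i : Int) : Int × Int × List Char :=
  let idx := st.1
  let idx2 := st.2.1
  let enc := st.2.2
  if PySem.List.pyGet? l i = PySem.List.pyGet? l (i + 1) then
    let temp := PySem.List.slice enc none (some (idx + idx2)) ++ ['X'] ++
                PySem.List.slice l (some (idx + 1)) none
    (idx + 1, idx2 + 1, temp)
  else
    (idx + 1, idx2, enc)

def add_x (text : String) : String :=
  let l := text.toList
  let s := (PySem.List.pyRange 0 ((l.length : Int) - 1) 1).foldl (addXStepA l) (0, 1, l)
  let enc := s.2.2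
  let enc := if enc.length % 2 ≠ 0 then enc ++ ['X'] else enc
  String.ofList enc

-- ===== PORT B =====
-- one element of B's comprehension: the piece for the pair (c, n)
def addXPiece (p : Char × Char) : List Char :=
  if p.1 = p.2 then [p.1, 'X'] else [p.1]

def add_x_alt (text : String) : String :=
  let l := text.toList
  let pieces := (l.zip l.tail).map addXPiece
  let enc := pieces.flatten ++ PySem.List.slice l (some (-1)) none
  let enc := if enc.length % 2 ≠ 0 then enc ++ ['X'] else enc
  String.ofList enc

-- ===== PRECONDITION & SPEC =====
def Spec_add_x (text : String) (out : String) : Prop := out = add_x_alt text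
instance (text : String) (out : String) : Decidable (Spec_add_x text out) := by unfold Spec_add_x; infer_instance

-- ===== CLAIM (what is proved, stated in full; the proofs are below) =====
def Claim_equal_add_x : Prop := ∀ (text : String), Dom_add_x text → Spec_add_x text (add_x text)

-- ===== LEMMAS AND PROOFS =====

lemma addX_flatten_len (s : List (Char × Char)) :
    ((s.map addXPiece).flatten).length
      = s.length + s.countP (fun p => decide (p.1 = p.2)) := by
  induction s with
  | nil => simp
  | cons p t ih =>
    simp [addXPiece, List.countP_cons, ih]
    split_ifs with h <;> simp [h] <;> omega

lemma addX_fold_inv (l : List Char) (k : Nat) (hk : k ≤ l.length - 1) :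
    (PySem.List.pyRange 0 (k : Int) 1).foldl (addXStepA l) (0, 1, l)
      = ((k : Int),
         1 + ((((l.zip l.tail).take k).countP (fun p => decide (p.1 = p.2)) : Nat) : Int),
         (((l.zip l.tail).take k).map addXPiece).flatten ++ l.drop k) := by
  induction k with
  | zero => simp [PySem.List.pyRange_one_eq_nil]
  | succ k ih =>
    have hk' : k ≤ l.length - 1 := by omega
    have hklt : k < l.length - 1 := by omega
    have hk1 : k + 1 < l.length := by omega
    have hkl : k < l.length := by omega
    have hsplit : PySem.List.pyRange 0 ((k + 1 : Nat) : Int) 1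
        = PySem.List.pyRange 0 (k : Int) 1 ++ [(k : Int)] := by
      push_cast
      exact PySem.List.pyRange_one_succ_right (by positivity)
    rw [hsplit, List.foldl_append, ih hk']
    have hzlen : (l.zip l.tail).length = l.length - 1 := by
      simp [List.length_zip, List.length_tail]
    have hzk : k < (l.zip l.tail).length := by omega
    have hzget : (l.zip l.tail)[k] = (l[k], l[k+1]) := by
      simp [List.getElem_zip, List.getElem_tail]
    have htake : (l.zip l.tail).take (k+1)
        = (l.zip l.tail).take k ++ [(l[k], l[k+1])] := by
      rw [List.take_add_one]
      simp [List.getElem?_eq_getElem hzk, hzget]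
    have hget1 : PySem.List.pyGet? l (k : Int) = some l[k] := by
      simp [PySem.List.pyGet?_natCast, List.getElem?_eq_getElem hkl]
    have hget2 : PySem.List.pyGet? l ((k : Int) + 1) = some l[k+1] := by
      have : ((k : Int) + 1) = ((k + 1 : Nat) : Int) := by push_cast; ring
      rw [this, PySem.List.pyGet?_natCast, List.getElem?_eq_getElem hk1]
    have hdropk : l.drop k = l[k] :: l.drop (k + 1) :=
      List.drop_eq_getElem_cons hkl
    set F := (((l.zip l.tail).take k).map addXPiece).flatten with hF
    have hFlen : F.length
        = k + ((l.zip l.tail).take k).countP (fun p => decide (p.1 = p.2)) := by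
      rw [hF, addX_flatten_len]
      congr 1
      simp [List.length_take]; omega
    simp only [List.foldl_cons, List.foldl_nil, addXStepA, hget1, hget2, Option.some.injEq]
    by_cases heq : l[k] = l[k+1]
    · simp only [if_pos heq]
      refine Prod.ext (by push_cast; ring) (Prod.ext (by simp; rw [htake]; simp [List.countP_append, heq]; ring) ?_)
      -- the list component
      simp only
      have hidx : (k : Int) + (1 + (((l.zip l.tail).take k).countP (fun p => decide (p.1 = p.2)) : Int))
          = ((F.length + 1 : Nat) : Int) := by
        rw [hFlen]; push_cast; ring
      rw [hidx, PySem.List.slice_to_natCast,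
          show ((k : Int) + 1) = ((k + 1 : Nat) : Int) from by push_cast; ring,
          PySem.List.slice_from_natCast, htake, hdropk]
      simp [List.take_append, addXPiece, heq]
      simp [hF, List.map_take, List.take_of_length_le]
    · simp only [if_neg heq]
      refine Prod.ext (by push_cast; ring) (Prod.ext (by simp; rw [htake]; simp [List.countP_append, heq]) ?_)
      simp only
      rw [htake, hdropk]
      simp [addXPiece, heq, hF, List.map_take]

lemma addX_enc_eq (l : List Char) :
    ((PySem.List.pyRange 0 ((l.length : Int) - 1) 1).foldl (addXStepA l) (0, 1, l)).2.2
      = ((l.zip l.tail).map addXPiece).flatten ++ PySem.List.slice l (some (-1)) none := by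
  rcases l with _ | ⟨c, t⟩
  · simp [PySem.List.pyRange_one_eq_nil, PySem.List.slice_from_neg_one]
  · set l := c :: t with hl
    have hlen : 1 ≤ l.length := by simp [hl]
    have hcast : ((l.length : Int) - 1) = ((l.length - 1 : Nat) : Int) := by
      push_cast [hlen]; ring
    rw [hcast, addX_fold_inv l (l.length - 1) (le_refl _)]
    have hzlen : (l.zip l.tail).length = l.length - 1 := by
      simp [List.length_zip, List.length_tail]
    rw [PySem.List.slice_from_neg_one]
    simp [List.take_of_length_le (le_of_eq hzlen)]

-- ===== VERDICT (by name: the statement is the Claim_ definition above) =====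
theorem add_x_spec : Claim_equal_add_x := by
  intro text _
  unfold Spec_add_x add_x add_x_alt
  simp only [addX_enc_eq]
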